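-- pv_equiv track=rewrite | github.com/dbzahariev/Python-and-Django | Python-Fundamentals/ex_01_list_and_dictionaries/list/02_split_by_word_casing.py | make_lists
-- ===== SOURCE A (Python) =====
-- def make_lists(all_words):
--     low_w = []
--     upper_w = []
--     mixed_w = []
--     for word in all_words:
--         low_case = False
--         upper_case = False
--         mixed_case = False
--         for letter in word:
--             if ord(letter) in range(97, 123):
--                 low_case = True
--             elif ord(letter) in range(65, 91):
--                 upper_case = True
--             else:
--                 mixed_case = True
--         if low_case and not upper_case and not mixed_case:
--             low_w.append(word)
--         elif upper_case and not low_case and not mixed_case: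
--             upper_w.append(word)
--         else:
--             mixed_w.append(word)
--     return low_w, upper_w, mixed_w
-- ===== SOURCE B (Python) =====
-- def _is_low(w):
--     return bool(w) and all('a' <= c <= 'z' for c in w)
--
--
-- def _is_up(w):
--     return bool(w) and all('A' <= c <= 'Z' for c in w)
--
--
-- def make_lists(all_words):
--     low = [w for w in all_words if _is_low(w)]
--     up = [w for w in all_words if _is_up(w)]
--     mixed = [w for w in all_words if not _is_low(w) and not _is_up(w)]
--     return low, up, mixed
-- ===== Notes on version B (the rewrite author's own statement) =====
-- stated objective: alternative
-- what changed: Replaced A's single pass that scans each word with three boolean flags and flag-combination branches by three independent staged filter passes over the list (low, up, remainder), each using a short-circuiting all() range test.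
import Mathlib
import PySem

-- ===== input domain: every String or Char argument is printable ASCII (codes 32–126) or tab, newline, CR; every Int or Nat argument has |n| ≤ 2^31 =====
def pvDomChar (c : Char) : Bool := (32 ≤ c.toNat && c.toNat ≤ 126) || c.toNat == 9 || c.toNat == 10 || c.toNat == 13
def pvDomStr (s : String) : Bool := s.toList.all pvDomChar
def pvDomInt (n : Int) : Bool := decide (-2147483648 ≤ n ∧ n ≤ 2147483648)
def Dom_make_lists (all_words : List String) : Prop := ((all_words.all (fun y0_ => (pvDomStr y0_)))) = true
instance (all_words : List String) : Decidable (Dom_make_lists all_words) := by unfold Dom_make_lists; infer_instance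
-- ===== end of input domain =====

-- B replaces A's single pass with three per-word boolean flags by three independent staged
-- filter passes (low, up, remainder), each a short-circuiting all-in-range test (alternative
-- decomposition, same cost).

-- ===== PORT A =====
-- inner loop of A: update the (low_case, upper_case, mixed_case) flags for one letter
def pvFlagStep (f : Bool × Bool × Bool) (letter : Char) : Bool × Bool × Bool :=
  if 97 ≤ letter.toNat ∧ letter.toNat < 123 then (true, f.2.1, f.2.2)
  else if 65 ≤ letter.toNat ∧ letter.toNat < 91 then (f.1, true, f.2.2)
  else (f.1, f.2.1, true)

def make_lists (all_words : List String) : List String × List String × List String :=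
  all_words.foldl
    (fun acc word =>
      let f := word.toList.foldl pvFlagStep (false, false, false)
      if f.1 && !f.2.1 && !f.2.2 then (acc.1 ++ [word], acc.2.1, acc.2.2)
      else if f.2.1 && !f.1 && !f.2.2 then (acc.1, acc.2.1 ++ [word], acc.2.2)
      else (acc.1, acc.2.1, acc.2.2 ++ [word]))
    ([], [], [])

-- ===== PORT B =====
def pvIsLow (w : String) : Bool := !w.toList.isEmpty && w.toList.all (fun c => 'a' ≤ c && c ≤ 'z')
def pvIsUp (w : String) : Bool := !w.toList.isEmpty && w.toList.all (fun c => 'A' ≤ c && c ≤ 'Z')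

def make_lists_alt (all_words : List String) : List String × List String × List String :=
  (all_words.filter pvIsLow,
   all_words.filter pvIsUp,
   all_words.filter (fun w => !pvIsLow w && !pvIsUp w))

-- ===== PRECONDITION & SPEC =====
def Spec_make_lists (all_words : List String) (out : List String × List String × List String) : Prop := out = make_lists_alt all_words
instance (all_words : List String) (out : List String × List String × List String) : Decidable (Spec_make_lists all_words out) := by unfold Spec_make_lists; infer_instance

-- ===== CLAIM (what is proved, stated in full; the proofs are below) =====
def Claim_equal_make_lists : Prop := ∀ (all_words : List String), Dom_make_lists all_words → Spec_make_lists all_words (make_lists all_words)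

-- ===== LEMMAS AND PROOFS =====

-- per-letter predicates of A's inner loop
def pvIsL (c : Char) : Bool := decide (97 ≤ c.toNat ∧ c.toNat < 123)
def pvIsU (c : Char) : Bool := decide (65 ≤ c.toNat ∧ c.toNat < 91)
def pvIsO (c : Char) : Bool := !pvIsL c && !pvIsU c

theorem pvL_not_U {c : Char} (h : pvIsL c = true) : pvIsU c = false := by
  simp only [pvIsL, decide_eq_true_eq] at h
  simp only [pvIsU, decide_eq_false_iff_not]
  omega

theorem pvU_not_L {c : Char} (h : pvIsU c = true) : pvIsL c = false := by
  simp only [pvIsU, decide_eq_true_eq] at h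
  simp only [pvIsL, decide_eq_false_iff_not]
  omega

theorem pvUO (c : Char) : (pvIsU c || pvIsO c) = !pvIsL c := by
  cases hL : pvIsL c
  · simp [pvIsO, hL]
  · simp [pvIsO, hL, pvL_not_U hL]

theorem pvLO (c : Char) : (pvIsL c || pvIsO c) = !pvIsU c := by
  cases hU : pvIsU c
  · cases hL : pvIsL c <;> simp [pvIsO, hL, hU]
  · simp [pvIsO, hU, pvU_not_L hU]

theorem pvFlag_fold (cs : List Char) : ∀ a b c : Bool,
    cs.foldl pvFlagStep (a, b, c) = (a || cs.any pvIsL, b || cs.any pvIsU, c || cs.any pvIsO) := by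
  induction cs with
  | nil => intro a b c; simp
  | cons x cs ih =>
    intro a b c
    simp only [List.foldl_cons, List.any_cons, pvFlagStep]
    split_ifs with h1 h2
    · have hL : pvIsL x = true := by simp [pvIsL, h1]
      have hU : pvIsU x = false := pvL_not_U hL
      have hO : pvIsO x = false := by simp [pvIsO, hL]
      rw [ih]; simp [hL, hU, hO, Bool.or_assoc]
    · have hL : pvIsL x = false := by simp [pvIsL]; omega
      have hU : pvIsU x = true := by simp [pvIsU, h2]
      have hO : pvIsO x = false := by simp [pvIsO, hU]
      rw [ih]; simp [hL, hU, hO, Bool.or_assoc]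
    · have hL : pvIsL x = false := by simp [pvIsL]; omega
      have hU : pvIsU x = false := by simp [pvIsU]; omega
      have hO : pvIsO x = true := by simp [pvIsO, hL, hU]
      rw [ih]; simp [hL, hU, hO, Bool.or_assoc]

-- A's category tests, as predicates on the word
def pvLowA (w : String) : Bool := w.toList.any pvIsL && !w.toList.any pvIsU && !w.toList.any pvIsO
def pvUpA (w : String) : Bool := w.toList.any pvIsU && !w.toList.any pvIsL && !w.toList.any pvIsO

theorem pvChar_low (c : Char) : ('a' ≤ c && c ≤ 'z') = pvIsL c := by
  have h1 : ('a' ≤ c) ↔ (97 ≤ c.toNat) := by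
    rw [Char.le_def, UInt32.le_iff_toNat_le]; exact Iff.rfl
  have h2 : (c ≤ 'z') ↔ (c.toNat ≤ 122) := by
    rw [Char.le_def, UInt32.le_iff_toNat_le]; exact Iff.rfl
  simp only [pvIsL, Bool.decide_and]
  rw [decide_eq_decide.mpr h1,
      decide_eq_decide.mpr (show (c ≤ 'z') ↔ (c.toNat < 123) by rw [h2]; omega)]

theorem pvChar_up (c : Char) : ('A' ≤ c && c ≤ 'Z') = pvIsU c := by
  have h1 : ('A' ≤ c) ↔ (65 ≤ c.toNat) := by
    rw [Char.le_def, UInt32.le_iff_toNat_le]; exact Iff.rfl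
  have h2 : (c ≤ 'Z') ↔ (c.toNat ≤ 90) := by
    rw [Char.le_def, UInt32.le_iff_toNat_le]; exact Iff.rfl
  simp only [pvIsU, Bool.decide_and]
  rw [decide_eq_decide.mpr h1,
      decide_eq_decide.mpr (show (c ≤ 'Z') ↔ (c.toNat < 91) by rw [h2]; omega)]

theorem pvAnyNotL (cs : List Char) :
    (cs.any pvIsU || cs.any pvIsO) = cs.any (fun c => !pvIsL c) := by
  induction cs with
  | nil => simp
  | cons x cs ih =>
    simp only [List.any_cons]
    rw [← ih, ← pvUO x]
    cases pvIsU x <;> cases pvIsO x <;> cases cs.any pvIsU <;> cases cs.any pvIsO <;> simp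

theorem pvAnyNotU (cs : List Char) :
    (cs.any pvIsL || cs.any pvIsO) = cs.any (fun c => !pvIsU c) := by
  induction cs with
  | nil => simp
  | cons x cs ih =>
    simp only [List.any_cons]
    rw [← ih, ← pvLO x]
    cases pvIsL x <;> cases pvIsO x <;> cases cs.any pvIsL <;> cases cs.any pvIsO <;> simp

theorem pvLowA_eq (w : String) : pvLowA w = pvIsLow w := by
  have hall : w.toList.all (fun c => 'a' ≤ c && c ≤ 'z') = w.toList.all pvIsL := by
    simp [pvChar_low]
  simp only [pvLowA, pvIsLow, hall]
  cases hl : w.toList.any pvIsL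
  · cases he : w.toList.isEmpty
    · rcases List.exists_mem_of_ne_nil w.toList (by simpa [List.isEmpty_iff] using he) with ⟨x, hx⟩
      have hxL : pvIsL x = false := by
        cases h : pvIsL x
        · rfl
        · exact absurd (List.any_of_mem hx h) (by simp [hl])
      have : w.toList.all pvIsL = false := by
        simp only [List.all_eq_false]; exact ⟨x, hx, by simp [hxL]⟩
      simp [this]
    · have : w.toList = [] := List.isEmpty_iff.mp he
      simp [this]
  · have hne : w.toList.isEmpty = false := by
      cases h : w.toList.isEmpty
      · rfl
      · rw [List.isEmpty_iff.mp h] at hl; simp at hl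
    rw [hne]
    simp only [Bool.true_and, Bool.not_false]
    rw [← Bool.not_or, pvAnyNotL]
    cases hA : w.toList.all pvIsL
    · rcases List.all_eq_false.mp hA with ⟨x, hx, hxf⟩
      have : w.toList.any (fun c => !pvIsL c) = true :=
        List.any_of_mem hx (by simp_all)
      simp [this]
    · have : w.toList.any (fun c => !pvIsL c) = false := by
        simp only [List.any_eq_false]
        intro x hx
        have := List.all_eq_true.mp hA x hx
        simp_all
      simp [this]

theorem pvUpA_eq (w : String) : pvUpA w = pvIsUp w := by
  have hall : w.toList.all (fun c => 'A' ≤ c && c ≤ 'Z') = w.toList.all pvIsU := by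
    simp [pvChar_up]
  simp only [pvUpA, pvIsUp, hall]
  cases hu : w.toList.any pvIsU
  · cases he : w.toList.isEmpty
    · rcases List.exists_mem_of_ne_nil w.toList (by simpa [List.isEmpty_iff] using he) with ⟨x, hx⟩
      have hxU : pvIsU x = false := by
        cases h : pvIsU x
        · rfl
        · exact absurd (List.any_of_mem hx h) (by simp [hu])
      have : w.toList.all pvIsU = false := by
        simp only [List.all_eq_false]; exact ⟨x, hx, by simp [hxU]⟩
      simp [this]
    · have : w.toList = [] := List.isEmpty_iff.mp he
      simp [this]
  · have hne : w.toList.isEmpty = false := by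
      cases h : w.toList.isEmpty
      · rfl
      · rw [List.isEmpty_iff.mp h] at hu; simp at hu
    rw [hne]
    simp only [Bool.true_and, Bool.not_false]
    rw [← Bool.not_or, pvAnyNotU]
    cases hA : w.toList.all pvIsU
    · rcases List.all_eq_false.mp hA with ⟨x, hx, hxf⟩
      have : w.toList.any (fun c => !pvIsU c) = true :=
        List.any_of_mem hx (by simp_all)
      simp [this]
    · have : w.toList.any (fun c => !pvIsU c) = false := by
        simp only [List.any_eq_false]
        intro x hx
        have := List.all_eq_true.mp hA x hx
        simp_all
      simp [this]

-- the two categories are mutually exclusive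
theorem pvUpA_not_LowA {w : String} (h : pvUpA w = true) : pvLowA w = false := by
  simp only [pvUpA, Bool.and_eq_true, Bool.not_eq_true'] at h
  simp only [pvLowA, h.1.2, Bool.false_and]

-- characterization of A's outer fold
theorem pvA_fold (ws : List String) : ∀ L U M : List String,
    ws.foldl
      (fun acc word =>
        let f := word.toList.foldl pvFlagStep (false, false, false)
        if f.1 && !f.2.1 && !f.2.2 then (acc.1 ++ [word], acc.2.1, acc.2.2)
        else if f.2.1 && !f.1 && !f.2.2 then (acc.1, acc.2.1 ++ [word], acc.2.2)
        else (acc.1, acc.2.1, acc.2.2 ++ [word])) (L, U, M)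
    = (L ++ ws.filter pvLowA,
       U ++ ws.filter (fun w => !pvLowA w && pvUpA w),
       M ++ ws.filter (fun w => !pvLowA w && !pvUpA w)) := by
  induction ws with
  | nil => intro L U M; simp
  | cons w ws ih =>
    intro L U M
    simp only [List.foldl_cons, List.filter_cons]
    rw [pvFlag_fold]
    simp only [Bool.false_or]
    have hLow : (w.toList.any pvIsL && !w.toList.any pvIsU && !w.toList.any pvIsO) = pvLowA w := rfl
    have hUp : (w.toList.any pvIsU && !w.toList.any pvIsL && !w.toList.any pvIsO) = pvUpA w := rfl
    rw [hLow, hUp]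
    cases hl : pvLowA w
    · cases hu : pvUpA w
      · simp only [hl, hu, Bool.false_and, Bool.and_false, Bool.not_false, Bool.and_true,
          Bool.true_and, if_false, ih]
        simp [hl, hu]
      · simp only [hl, hu, Bool.false_and, Bool.and_true, Bool.not_false, if_false, if_true, ih]
        simp [hl, hu]
    · have hu : pvUpA w = false := by
        have h := hl
        simp only [pvLowA, Bool.and_eq_true, Bool.not_eq_true'] at h
        simp only [pvUpA, h.1.2, Bool.false_and]
      simp only [hl, hu, Bool.true_and, Bool.not_true, Bool.and_false, Bool.false_and, if_true, ih]
      simp [hl, hu]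

-- ===== VERDICT (by name: the statement is the Claim_ definition above) =====
theorem make_lists_spec : Claim_equal_make_lists := by
  intro all_words _
  unfold Spec_make_lists make_lists make_lists_alt
  rw [pvA_fold]
  simp only [List.nil_append, Prod.mk.injEq]
  refine ⟨?_, ?_, ?_⟩
  · exact List.filter_congr (fun w _ => pvLowA_eq w)
  · refine List.filter_congr (fun w _ => ?_)
    rw [← pvUpA_eq]
    cases hu : pvUpA w
    · simp
    · simp [pvUpA_not_LowA hu]
  · exact List.filter_congr (fun w _ => by rw [← pvLowA_eq, ← pvUpA_eq])
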